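-- pv_equiv track=rewrite | github.com/osgeonepal/osmsg | osmsg/output.py | _ordered_keys
-- ===== SOURCE A (Python) =====
-- from typing import Any, Dict, List, Optional
--
-- def _ordered_keys(row: Dict) -> List[str]:
--     """Consistent column order for CSV / display."""
--     priority = [
--         "rank",
--         "uid",
--         "name",
--         "profile",
--         "changesets",
--         "map_changes",
--         "nodes_create",
--         "nodes_modify",
--         "nodes_delete",
--         "ways_create",
--         "ways_modify",
--         "ways_delete",
--         "rels_create",
--         "rels_modify",
--         "rels_delete",
--         "poi_create",
--         "poi_modify",
--         "hashtags",
--         "editors",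
--         "countries",
--         "tags_create",
--         "tags_modify",
--         "start_date",
--         "end_date",
--     ]
--     seen = set(priority)
--     # tag_* columns (--tags, --length) come after the fixed block
--     extra = [k for k in row if k not in seen]
--     return [k for k in priority if k in row] + extra
-- ===== SOURCE B (Python) =====
-- def _ordered_keys(row):
--     """Consistent column order for CSV / display."""
--     priority = (
--         "rank uid name profile changesets map_changes "
--         "nodes_create nodes_modify nodes_delete "
--         "ways_create ways_modify ways_delete "
--         "rels_create rels_modify rels_delete "
--         "poi_create poi_modify hashtags editors countries "
--         "tags_create tags_modify start_date end_date"
--     ).split()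
--     index = {k: i for i, k in enumerate(priority)}
--     # stable sort: priority keys in index order first, extras keep row order
--     return sorted(row, key=lambda k: index.get(k, len(priority)))
-- ===== Notes on version B (the rewrite author's own statement) =====
-- stated objective: idiomatic
-- what changed: Replaces A's two filtering comprehensions (one over the priority list, one over the row) by a single stable sort of the row's keys under a precomputed priority-index table (built once from a split string) with an end-of-list sentinel for extras; Pre_ excludes association lists with duplicate keys, which do not represent a Python dict (the parameter's type).
import Mathlib
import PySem

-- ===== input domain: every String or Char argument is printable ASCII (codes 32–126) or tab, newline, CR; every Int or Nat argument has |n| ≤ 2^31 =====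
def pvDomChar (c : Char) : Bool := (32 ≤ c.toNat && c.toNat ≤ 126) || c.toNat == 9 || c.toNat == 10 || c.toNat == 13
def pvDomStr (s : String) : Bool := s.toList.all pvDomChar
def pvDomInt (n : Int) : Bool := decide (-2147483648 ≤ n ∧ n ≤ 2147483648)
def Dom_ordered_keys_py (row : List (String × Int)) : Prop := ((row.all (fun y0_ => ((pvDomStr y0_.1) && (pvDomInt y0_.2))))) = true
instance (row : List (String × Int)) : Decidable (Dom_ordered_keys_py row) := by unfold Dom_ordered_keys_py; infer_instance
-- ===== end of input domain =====

-- B replaces A's two filtering comprehensions by one stable sort of the row's keys under a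
-- precomputed priority-index table (built from one split string; extras get the sentinel
-- len(priority)); same output, idiomatic.

set_option maxRecDepth 4096


-- ===== PORT A =====
-- the `priority` list literal of A
def pvPriorityA : List String :=
  ["rank", "uid", "name", "profile", "changesets", "map_changes",
   "nodes_create", "nodes_modify", "nodes_delete", "ways_create", "ways_modify",
   "ways_delete", "rels_create", "rels_modify", "rels_delete", "poi_create",
   "poi_modify", "hashtags", "editors", "countries", "tags_create", "tags_modify",
   "start_date", "end_date"]

def ordered_keys_py (row : List (String × Int)) : List String :=
  let priority := pvPriorityA
  let seen : PySem.Set String := PySem.Set.ofList priority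
  let keys := row.map Prod.fst                    -- iteration over the dict's keys
  let extra := keys.filter (fun k => !(PySem.Set.contains seen k))
  (priority.filter (fun k => keys.contains k)) ++ extra

-- ===== PORT B =====
-- B's priority: one space-separated string, split (exact: the string is plain ASCII words)
def pvPriorityB : List String :=
  PySem.Str.split₀ ("rank uid name profile changesets map_changes nodes_create nodes_modify nodes_delete ways_create ways_modify ways_delete rels_create rels_modify rels_delete poi_create poi_modify hashtags editors countries tags_create tags_modify start_date end_date")

-- index = {k: i for i, k in enumerate(priority)}
def pvIndexB : PySem.Dict String Int :=
  (PySem.List.enumerate pvPriorityB).foldl (fun d p => d.insert p.2 p.1) PySem.Dict.empty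

def ordered_keys_py_alt (row : List (String × Int)) : List String :=
  PySem.List.sorted (row.map Prod.fst)
    (fun k => pvIndexB.getD k (pvPriorityB.length : Int)) false

-- ===== PRECONDITION & SPEC =====
-- Pre_ excludes association lists with a repeated key: they do not represent a Python dict
-- (the argument's type), on which both programs are defined.
def Pre_ordered_keys_py (row : List (String × Int)) : Prop := (row.map Prod.fst).Nodup
instance (row : List (String × Int)) : Decidable (Pre_ordered_keys_py row) := by unfold Pre_ordered_keys_py; infer_instance
def pvWitness_ordered_keys_py : (List (String × Int)) := [("name", 3), ("tag_building", 1), ("uid", 7)]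

def Spec_ordered_keys_py (row : List (String × Int)) (out : List String) : Prop := out = ordered_keys_py_alt row
instance (row : List (String × Int)) (out : List String) : Decidable (Spec_ordered_keys_py row out) := by unfold Spec_ordered_keys_py; infer_instance

-- ===== CLAIM (what is proved, stated in full; the proofs are below) =====
def Claim_equal_ordered_keys_py : Prop := ∀ (row : List (String × Int)), Dom_ordered_keys_py row → Pre_ordered_keys_py row → Spec_ordered_keys_py row (ordered_keys_py row)

-- ===== LEMMAS AND PROOFS =====

-- insert x into A ++ B: x refuses to go before anything in A and goes before all of B
theorem pv_insertBy_middle {α : Type} (before : α → α → Bool) (x : α) (A B : List α)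
    (hA : ∀ a ∈ A, before x a = false) (hB : ∀ b ∈ B, before x b = true) :
    PySem.List.insertBy before x (A ++ B) = A ++ x :: B := by
  induction A with
  | nil =>
    cases B with
    | nil => simp [PySem.List.insertBy]
    | cons b B' => simp [PySem.List.insertBy, hB b (by simp)]
  | cons a A' ih =>
    have ha := hA a (by simp)
    simp only [List.cons_append, PySem.List.insertBy, ha, Bool.false_eq_true, if_false]
    exact congrArg (a :: ·) (ih (fun a' h => hA a' (by simp [h])))

-- stable sort by position-in-P key = P's present elements in P order, then the extras in order
theorem pv_sorted_idxOf (P : List String) (hP : P.Nodup) :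
    ∀ xs : List String, xs.Nodup →
      PySem.List.sorted xs (fun k => (P.idxOf k : Int)) false
        = P.filter (fun p => decide (p ∈ xs)) ++ xs.filter (fun k => decide (k ∉ P)) := by
  intro xs
  induction xs using List.reverseRecOn with
  | nil => intro _; simp [PySem.List.sorted_eq_foldl_insertBy]
  | append_singleton xs x ih =>
    intro hnd
    have hxs : xs.Nodup := hnd.of_append_left
    have hx : x ∉ xs := by
      intro hmem
      exact (List.disjoint_of_nodup_append hnd) hmem (by simp)
    rw [PySem.List.sorted_eq_foldl_insertBy, List.foldl_append, List.foldl_cons, List.foldl_nil,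
        ← PySem.List.sorted_eq_foldl_insertBy, ih hxs]
    by_cases hxP : x ∈ P
    · obtain ⟨s, t, rfl⟩ := List.append_of_mem hxP
      have hxs' : x ∉ s := by
        intro h; exact (List.disjoint_of_nodup_append hP) h (by simp)
      have hxt : x ∉ t := by
        have := hP.of_append_right
        simp only [List.nodup_cons] at this
        exact this.1
      have hfx : List.idxOf x (s ++ x :: t) = s.length := by
        rw [List.idxOf_append, if_neg hxs', List.idxOf_cons]
        simp
      -- split P's filter at x
      have hsplit : ∀ ys : List String, x ∉ ys →
          (s ++ x :: t).filter (fun p => decide (p ∈ ys)) =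
            s.filter (fun p => decide (p ∈ ys)) ++ t.filter (fun p => decide (p ∈ ys)) := by
        intro ys hy
        simp [List.filter_append, hy]
      rw [hsplit xs hx]
      have key_s : ∀ a ∈ s.filter (fun p => decide (p ∈ xs)),
          (decide ((List.idxOf x (s ++ x :: t) : Int) < (List.idxOf a (s ++ x :: t) : Int))) = false := by
        intro a ha
        have has : a ∈ s := List.mem_of_mem_filter ha
        have : List.idxOf a (s ++ x :: t) = List.idxOf a s := by
          rw [List.idxOf_append, if_pos has]
        rw [hfx, this]
        have := List.idxOf_lt_length_iff.mpr has
        simp; omega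
      have key_t : ∀ b ∈ t.filter (fun p => decide (p ∈ xs)) ++ xs.filter (fun k => decide (k ∉ s ++ x :: t)),
          (decide ((List.idxOf x (s ++ x :: t) : Int) < (List.idxOf b (s ++ x :: t) : Int))) = true := by
        intro b hb
        rw [hfx]
        rcases List.mem_append.mp hb with hb | hb
        · have hbt : b ∈ t := List.mem_of_mem_filter hb
          have hbs : b ∉ s := fun h =>
            (List.disjoint_of_nodup_append hP) h (by simp [hbt])
          have hbx : b ≠ x := fun h => hxt (h ▸ hbt)
          have : List.idxOf b (s ++ x :: t) = List.idxOf b (x :: t) + s.length := by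
            rw [List.idxOf_append, if_neg hbs]
          rw [this, List.idxOf_cons]
          have : (x == b) = false := by simp [Ne.symm hbx]
          rw [this]
          simp
        · have hbP : b ∉ s ++ x :: t := by
            have := List.of_mem_filter hb
            simpa using this
          have : List.idxOf b (s ++ x :: t) = (s ++ x :: t).length := List.idxOf_eq_length hbP
          rw [this]
          simp
      rw [List.append_assoc, pv_insertBy_middle _ x _ _ key_s key_t]
      -- now massage the RHS
      have e1 : (s ++ x :: t).filter (fun p => decide (p ∈ xs ++ [x])) =
          s.filter (fun p => decide (p ∈ xs)) ++ x :: t.filter (fun p => decide (p ∈ xs)) := by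
        rw [List.filter_append, List.filter_cons]
        have hs : s.filter (fun p => decide (p ∈ xs ++ [x])) = s.filter (fun p => decide (p ∈ xs)) := by
          apply List.filter_congr
          intro p hp
          have : p ≠ x := fun h => hxs' (h ▸ hp)
          simp [this]
        have ht : t.filter (fun p => decide (p ∈ xs ++ [x])) = t.filter (fun p => decide (p ∈ xs)) := by
          apply List.filter_congr
          intro p hp
          have : p ≠ x := fun h => hxt (h ▸ hp)
          simp [this]
        rw [hs, ht]
        have hxm : (decide (x ∈ xs ++ [x])) = true := by simp
        rw [hxm]
        simp
      have e2 : (xs ++ [x]).filter (fun k => decide (k ∉ s ++ x :: t)) =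
          xs.filter (fun k => decide (k ∉ s ++ x :: t)) := by
        rw [List.filter_append]
        simp
      rw [e1, e2]
      simp
    · -- x is an extra key: it goes to the very end
      have hall : ∀ y ∈ P.filter (fun p => decide (p ∈ xs)) ++ xs.filter (fun k => decide (k ∉ P)),
          (decide ((List.idxOf x P : Int) < (List.idxOf y P : Int))) = false := by
        intro y _
        have h1 : List.idxOf x P = P.length := List.idxOf_eq_length hxP
        have h2 : List.idxOf y P ≤ P.length := List.idxOf_le_length
        rw [h1]; simp; omega
      rw [PySem.List.insertBy_of_forall_not_before _ _ _ hall]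
      have e1 : P.filter (fun p => decide (p ∈ xs ++ [x])) = P.filter (fun p => decide (p ∈ xs)) := by
        apply List.filter_congr
        intro p hp
        have : p ≠ x := fun h => hxP (h ▸ hp)
        simp [this]
      have e2 : (xs ++ [x]).filter (fun k => decide (k ∉ P)) =
          xs.filter (fun k => decide (k ∉ P)) ++ [x] := by
        rw [List.filter_append]
        simp [hxP]
      rw [e1, e2]
      simp

-- B's split string yields exactly A's priority list
theorem pvPriorityB_eq : pvPriorityB = pvPriorityA := by decide

-- B's key function is position-in-priority (sentinel 24 = the length for extras)
theorem pv_key_eq : ∀ k : String,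
    pvIndexB.getD k (pvPriorityB.length : Int) = (pvPriorityA.idxOf k : Int) := by
  intro k
  have hd : pvIndexB = (((((((((((((((((((((((((PySem.Dict.empty : PySem.Dict String Int).insert "rank" 0).insert "uid" 1).insert "name" 2).insert "profile" 3).insert "changesets" 4).insert "map_changes" 5).insert "nodes_create" 6).insert "nodes_modify" 7).insert "nodes_delete" 8).insert "ways_create" 9).insert "ways_modify" 10).insert "ways_delete" 11).insert "rels_create" 12).insert "rels_modify" 13).insert "rels_delete" 14).insert "poi_create" 15).insert "poi_modify" 16).insert "hashtags" 17).insert "editors" 18).insert "countries" 19).insert "tags_create" 20).insert "tags_modify" 21).insert "start_date" 22).insert "end_date" 23) := by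
    decide
  rw [pvPriorityB_eq]
  by_cases h : k ∈ pvPriorityA
  · simp only [pvPriorityA, List.mem_cons, List.not_mem_nil, or_false] at h
    rcases h with rfl|rfl|rfl|rfl|rfl|rfl|rfl|rfl|rfl|rfl|rfl|rfl|rfl|rfl|rfl|rfl|rfl|rfl|rfl|rfl|rfl|rfl|rfl|rfl <;> rfl
  · have h2 : List.idxOf k pvPriorityA = pvPriorityA.length := List.idxOf_eq_length h
    rw [h2]
    simp only [pvPriorityA, List.mem_cons, List.not_mem_nil, or_false, not_or] at h
    obtain ⟨h1,h2,h3,h4,h5,h6,h7,h8,h9,h10,h11,h12,h13,h14,h15,h16,h17,h18,h19,h20,h21,h22,h23,h24⟩ := h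
    rw [hd]
    simp only [PySem.Dict.getD_insert]
    rw [if_neg h24, if_neg h23, if_neg h22, if_neg h21, if_neg h20, if_neg h19, if_neg h18,
        if_neg h17, if_neg h16, if_neg h15, if_neg h14, if_neg h13, if_neg h12, if_neg h11,
        if_neg h10, if_neg h9, if_neg h8, if_neg h7, if_neg h6, if_neg h5, if_neg h4,
        if_neg h3, if_neg h2, if_neg h1]
    simp [PySem.Dict.getD, PySem.Dict.get?, PySem.Dict.empty]

theorem pvPriorityA_nodup : pvPriorityA.Nodup := by decide

-- ===== VERDICT (by name: the statement is the Claim_ definition above) =====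
theorem ordered_keys_py_spec : Claim_equal_ordered_keys_py := by
  intro row _hdom hpre
  simp only [Spec_ordered_keys_py, ordered_keys_py, ordered_keys_py_alt]
  have hkeyfun : (fun k => pvIndexB.getD k (pvPriorityB.length : Int))
      = (fun k => (pvPriorityA.idxOf k : Int)) := funext pv_key_eq
  rw [hkeyfun, pv_sorted_idxOf pvPriorityA pvPriorityA_nodup (row.map Prod.fst) hpre]
  congr 1
  · apply List.filter_congr
    intro p _
    simp
  · apply List.filter_congr
    intro k _
    simp [PySem.Set.mem_ofList]
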